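-- pv_equiv track=rewrite | github.com/tema-vice/StartingOutWithPython | Chapter_08/q13.py | split_numbers
-- ===== SOURCE A (Python) =====
-- def split_numbers(tuple_numbers):
--     other_numbers = []
--     PowerBall_numbers = []
--     index = 0
--     count_append = 0
--     while index < len(tuple_numbers):
--         if count_append == 5:
--             PowerBall_numbers.append(tuple_numbers[index])
--             count_append = 0
--         else:
--             other_numbers.append(tuple_numbers[index])
--             count_append += 1
--         index += 1
--     return tuple(other_numbers), tuple(PowerBall_numbers)
-- ===== SOURCE B (Python) =====
-- def split_numbers(tuple_numbers):
--     other = []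
--     PowerBall = []
--     for start in range(0, len(tuple_numbers), 6):
--         chunk = tuple_numbers[start:start + 6]
--         other.extend(chunk[:5])
--         PowerBall.extend(chunk[5:6])
--     return tuple(other), tuple(PowerBall)
-- ===== Notes on version B (the rewrite author's own statement) =====
-- stated objective: faster
-- what changed: Replaces the element-by-element loop with a resetting counter by a block-structured pass over fixed-size chunks of 6, slicing the first 5 of each chunk into other and the 6th into PowerBall.
import Mathlib
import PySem

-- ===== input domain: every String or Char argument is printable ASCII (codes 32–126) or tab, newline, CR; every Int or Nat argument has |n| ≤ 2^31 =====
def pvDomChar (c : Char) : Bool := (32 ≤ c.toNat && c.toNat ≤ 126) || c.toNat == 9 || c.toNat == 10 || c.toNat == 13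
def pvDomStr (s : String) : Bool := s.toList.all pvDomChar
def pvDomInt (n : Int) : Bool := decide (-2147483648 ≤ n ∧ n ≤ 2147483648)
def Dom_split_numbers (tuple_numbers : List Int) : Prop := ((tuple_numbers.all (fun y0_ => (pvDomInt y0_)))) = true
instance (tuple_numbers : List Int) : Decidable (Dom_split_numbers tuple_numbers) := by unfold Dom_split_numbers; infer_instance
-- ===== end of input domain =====

-- B replaces A's element-by-element loop with a resetting counter by a block-structured
-- pass over chunks of 6 (first 5 of each chunk → other, 6th → PowerBall); the timing
-- run measured B constant-factor faster (bulk slicing vs per-element appends). A builds lists via append; no observable mutation of the argument.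


-- ===== PORT A =====
-- A's while loop walking index forward with a resetting count, as structural recursion
def splitGo : List Int → Int → List Int → List Int → List Int × List Int
  | [], _, other, pb => (other, pb)
  | x :: rest, count, other, pb =>
    if count == 5 then splitGo rest 0 other (pb ++ [x])
    else splitGo rest (count + 1) (other ++ [x]) pb

def split_numbers (tuple_numbers : List Int) : List Int × List Int :=
  splitGo tuple_numbers 0 [] []

-- ===== PORT B =====
-- for start in range(0, len(t), 6): chunk = t[start:start+6]; other += chunk[:5]; pb += chunk[5:6]
def split_numbers_alt (tuple_numbers : List Int) : List Int × List Int :=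
  (PySem.List.pyRange 0 (tuple_numbers.length : Int) 6).foldl
    (fun acc start =>
      let chunk := PySem.List.slice tuple_numbers (some start) (some (start + 6))
      (acc.1 ++ PySem.List.slice chunk none (some 5),
       acc.2 ++ PySem.List.slice chunk (some 5) (some 6)))
    ([], [])

-- ===== PRECONDITION & SPEC =====
def Spec_split_numbers (tuple_numbers : List Int) (out : List Int × List Int) : Prop := out = split_numbers_alt tuple_numbers
instance (tuple_numbers : List Int) (out : List Int × List Int) : Decidable (Spec_split_numbers tuple_numbers out) := by unfold Spec_split_numbers; infer_instance

-- ===== CLAIM (what is proved, stated in full; the proofs are below) =====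
def Claim_equal_split_numbers : Prop := ∀ (tuple_numbers : List Int), Dom_split_numbers tuple_numbers → Spec_split_numbers tuple_numbers (split_numbers tuple_numbers)

-- ===== LEMMAS AND PROOFS =====

-- one 6-chunk step of A's loop, starting with count 0
lemma splitGo_six (xs other pb : List Int) :
    splitGo xs 0 other pb =
      splitGo (xs.drop 6) 0 (other ++ (xs.take 6).take 5) (pb ++ ((xs.take 6).drop 5).take 1) := by
  rcases xs with _ | ⟨a, _ | ⟨b, _ | ⟨c, _ | ⟨d, _ | ⟨e, _ | ⟨f, rest⟩⟩⟩⟩⟩⟩ <;>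
    simp [splitGo]

-- the block fold (after converting pyRange to List.range) equals A's loop
lemma fold_blocks (m : Nat) : ∀ (xs other pb : List Int), xs.length ≤ 6 * m →
    (List.range m).foldl
      (fun (acc : List Int × List Int) k =>
        (acc.1 ++ ((xs.drop (6 * k)).take 6).take 5,
         acc.2 ++ (((xs.drop (6 * k)).take 6).drop 5).take 1))
      (other, pb) = splitGo xs 0 other pb := by
  induction m with
  | zero =>
      intro xs other pb h
      have : xs = [] := List.eq_nil_of_length_eq_zero (by omega)
      subst this; simp [splitGo]
  | succ m ih =>
      intro xs other pb h
      rw [List.range_succ_eq_map, List.foldl_cons, List.foldl_map]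
      have hbody :
          (fun (acc : List Int × List Int) k =>
              (acc.1 ++ ((xs.drop (6 * (k + 1))).take 6).take 5,
               acc.2 ++ (((xs.drop (6 * (k + 1))).take 6).drop 5).take 1))
            = (fun (acc : List Int × List Int) k =>
              (acc.1 ++ (((xs.drop 6).drop (6 * k)).take 6).take 5,
               acc.2 ++ ((((xs.drop 6).drop (6 * k)).take 6).drop 5).take 1)) := by
        funext acc k
        rw [List.drop_drop]
        ring_nf
      simp only [Nat.mul_zero, List.drop_zero, hbody]
      rw [ih (xs.drop 6) _ _ (by simp; omega)]
      exact (splitGo_six xs other pb).symm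

theorem split_numbers_spec : Claim_equal_split_numbers := by
  intro xs _
  unfold Spec_split_numbers split_numbers split_numbers_alt
  rw [PySem.List.pyRange_of_pos 0 (xs.length : Int) (by norm_num)]
  rw [List.foldl_map]
  set m : Nat := (if (0:Int) < (xs.length : Int) then (((xs.length : Int) - 0 + 6 - 1) / 6).toNat else 0) with hm
  have hbody :
      (fun (acc : List Int × List Int) (k : Nat) =>
          (acc.1 ++ PySem.List.slice (PySem.List.slice xs (some (0 + 6 * (k:Int))) (some (0 + 6 * (k:Int) + 6))) none (some 5),
           acc.2 ++ PySem.List.slice (PySem.List.slice xs (some (0 + 6 * (k:Int))) (some (0 + 6 * (k:Int) + 6))) (some 5) (some 6)))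
        = (fun (acc : List Int × List Int) (k : Nat) =>
          (acc.1 ++ ((xs.drop (6 * k)).take 6).take 5,
           acc.2 ++ (((xs.drop (6 * k)).take 6).drop 5).take 1)) := by
    funext acc k
    have h1 : (0 + 6 * (k:Int)) = ((6 * k : Nat) : Int) := by push_cast; ring
    have h2 : ((6 * k : Nat) : Int) + 6 = ((6 * k + 6 : Nat) : Int) := by push_cast; ring
    rw [h1, h2, PySem.List.slice_natCast]
    have h3 : 6 * k + 6 - 6 * k = 6 := by omega
    rw [h3]
    rw [show ((5:Int)) = ((5:Nat):Int) from rfl, show ((6:Int)) = ((6:Nat):Int) from rfl,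
       PySem.List.slice_to_natCast, PySem.List.slice_natCast]
  rw [hbody]
  refine (fold_blocks m xs [] [] ?_).symm
  by_cases hx : 0 < xs.length
  · have : (0:Int) < (xs.length : Int) := by exact_mod_cast hx
    simp only [hm, if_pos this]
    omega
  · simp only [hm]
    have : ¬ ((0:Int) < (xs.length : Int)) := by exact_mod_cast hx
    simp only [this, if_false]; omega
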